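-- pv_equiv track=rewrite | github.com/MrBrantCode/unitest_baseline | mut_generate/mist_train_cf/cf_39468/solution.py | process_sources
-- ===== SOURCE A (Python) =====
-- def process_sources(urls, hostDict, language_mapping):
--     result = []
--     for url in urls:
--         for host, options in hostDict.items():
--             if url in options:
--                 for lang_type, source_type in language_mapping.items():
--                     if lang_type in options:
--                         result.append((lang_type, source_type))
--                         break
--                 else:
--                     result.append(('en', None))
--                 break
--         else:
--             result.append(('en', None))
--     return result
-- ===== SOURCE B (Python) =====
-- def process_sources(urls, hostDict, language_mapping):
--     # Precompute, per option element, the answer of the first host whose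
--     # options contain it; then each url is a single dict lookup.
--     index = {}
--     for options in hostDict.values():
--         opts = set(options)
--         ans = ('en', None)
--         for lang_type, source_type in language_mapping.items():
--             if lang_type in opts:
--                 ans = (lang_type, source_type)
--                 break
--         for e in options:
--             if e not in index:
--                 index[e] = ans
--     return [index.get(url, ('en', None)) for url in urls]
-- ===== Notes on version B (the rewrite author's own statement) =====
-- stated objective: faster
-- what changed: Instead of scanning all hosts (and the language mapping) once per url, B builds in one pass over hostDict an element-to-answer index (first host wins, per-host answer computed once with a set for membership) and then answers each url by a single dict lookup.
import Mathlib
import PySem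

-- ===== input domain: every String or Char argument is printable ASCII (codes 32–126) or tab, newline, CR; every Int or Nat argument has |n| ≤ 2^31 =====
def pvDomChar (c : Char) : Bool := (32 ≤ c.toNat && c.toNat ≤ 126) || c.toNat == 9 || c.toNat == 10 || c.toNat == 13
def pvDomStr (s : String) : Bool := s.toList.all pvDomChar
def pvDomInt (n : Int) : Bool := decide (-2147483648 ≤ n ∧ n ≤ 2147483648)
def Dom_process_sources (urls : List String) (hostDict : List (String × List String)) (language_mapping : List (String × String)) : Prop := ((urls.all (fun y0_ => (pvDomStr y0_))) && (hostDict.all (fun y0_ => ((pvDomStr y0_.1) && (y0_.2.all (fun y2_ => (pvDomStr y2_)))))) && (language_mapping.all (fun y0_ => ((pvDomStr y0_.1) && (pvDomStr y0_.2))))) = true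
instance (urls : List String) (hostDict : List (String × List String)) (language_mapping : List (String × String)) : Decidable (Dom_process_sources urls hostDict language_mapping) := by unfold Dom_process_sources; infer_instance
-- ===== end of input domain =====

-- B replaces the per-url scan over hosts and languages by a precomputed element→answer index built in one pass (faster, asymptotic in the number of urls).


-- ===== PORT A =====
-- inner 'for lang_type, source_type in language_mapping.items(): … break / else' loop
def psLangFor (options : List String) : List (String × String) → String × Option String
  | [] => ("en", none)
  | (lang_type, source_type) :: rest =>
      if options.contains lang_type then (lang_type, some source_type)
      else psLangFor options rest

-- middle 'for host, options in hostDict.items(): … break / else' loop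
def psRow (url : String) (language_mapping : List (String × String)) : List (String × List String) → String × Option String
  | [] => ("en", none)
  | (_, options) :: rest =>
      if options.contains url then psLangFor options language_mapping
      else psRow url language_mapping rest

def process_sources (urls : List String) (hostDict : List (String × List String)) (language_mapping : List (String × String)) : List (String × Option String) :=
  urls.foldl (fun result url => result ++ [psRow url language_mapping hostDict]) []

-- ===== PORT B =====
-- B's inner loop computing 'ans' for one host (membership tested against set(options))
def altAns (opts : PySem.Set String) : List (String × String) → String × Option String
  | [] => ("en", none)
  | (lang_type, source_type) :: rest =>
      if PySem.Set.contains opts lang_type then (lang_type, some source_type)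
      else altAns opts rest

-- B's index-building pass over hostDict.values()
def altIndex (hostDict : List (String × List String)) (language_mapping : List (String × String)) : PySem.Dict String (String × Option String) :=
  hostDict.foldl
    (fun index p =>
      let ans := altAns (PySem.Set.ofList p.2) language_mapping
      p.2.foldl (fun index e => if index.contains e then index else index.insert e ans) index)
    PySem.Dict.empty

def process_sources_alt (urls : List String) (hostDict : List (String × List String)) (language_mapping : List (String × String)) : List (String × Option String) :=
  urls.map (fun url => (altIndex hostDict language_mapping).getD url ("en", none))

-- ===== PRECONDITION & SPEC =====
def Spec_process_sources (urls : List String) (hostDict : List (String × List String)) (language_mapping : List (String × String)) (out : List (String × Option String)) : Prop := out = process_sources_alt urls hostDict language_mapping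
instance (urls : List String) (hostDict : List (String × List String)) (language_mapping : List (String × String)) (out : List (String × Option String)) : Decidable (Spec_process_sources urls hostDict language_mapping out) := by unfold Spec_process_sources; infer_instance

-- ===== CLAIM (what is proved, stated in full; the proofs are below) =====
def Claim_equal_process_sources : Prop := ∀ (urls : List String) (hostDict : List (String × List String)) (language_mapping : List (String × String)), Dom_process_sources urls hostDict language_mapping → Spec_process_sources urls hostDict language_mapping (process_sources urls hostDict language_mapping)

-- ===== LEMMAS AND PROOFS =====

-- the first-host answer as an Option: none iff no host's options contain the url
def rowOpt (url : String) (language_mapping : List (String × String)) : List (String × List String) → Option (String × Option String)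
  | [] => none
  | (_, options) :: rest =>
      if options.contains url then some (psLangFor options language_mapping)
      else rowOpt url language_mapping rest

lemma altAns_ofList (options : List String) (lm : List (String × String)) :
    altAns (PySem.Set.ofList options) lm = psLangFor options lm := by
  induction lm with
  | nil => rfl
  | cons p rest ih =>
      obtain ⟨lang, src⟩ := p
      have hc : PySem.Set.contains (PySem.Set.ofList options) lang = options.contains lang := by
        rw [Bool.eq_iff_iff]
        simp [PySem.Set.mem_ofList]
      simp only [altAns, psLangFor, hc, ih]

lemma get?_inner_fold (options : List String) (ans : String × Option String)
    (d : PySem.Dict String (String × Option String)) (u : String) :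
    (options.foldl (fun index e => if index.contains e then index else index.insert e ans) d).get? u
      = match d.get? u with
        | some v => some v
        | none => if options.contains u then some ans else none := by
  induction options generalizing d with
  | nil => cases h : d.get? u <;> exact h
  | cons x rest ih =>
      rw [List.foldl_cons, ih]
      by_cases hux : u = x
      · subst hux
        by_cases hcx : d.contains u = true
        · rw [if_pos hcx]
          rw [PySem.Dict.contains_eq_isSome_get?] at hcx
          cases h : d.get? u with
          | some v => simp
          | none => rw [h] at hcx; simp at hcx
        · rw [if_neg hcx, PySem.Dict.get?_insert_self]
          rw [PySem.Dict.contains_eq_isSome_get?] at hcx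
          cases h : d.get? u with
          | some v => rw [h] at hcx; simp at hcx
          | none => simp
      · have hg : (if d.contains x = true then d else d.insert x ans).get? u = d.get? u := by
          by_cases hcx : d.contains x = true
          · rw [if_pos hcx]
          · rw [if_neg hcx]; exact PySem.Dict.get?_insert_of_ne _ _ hux
        rw [hg]
        cases h : d.get? u with
        | some v => simp
        | none => simp [hux]

lemma get?_build_fold (hd : List (String × List String)) (lm : List (String × String))
    (d : PySem.Dict String (String × Option String)) (u : String) :
    (hd.foldl
        (fun index p =>
          let ans := altAns (PySem.Set.ofList p.2) lm
          p.2.foldl (fun index e => if index.contains e then index else index.insert e ans) index)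
        d).get? u
      = match d.get? u with
        | some v => some v
        | none => rowOpt u lm hd := by
  induction hd generalizing d with
  | nil => cases h : d.get? u <;> simp [h, rowOpt]
  | cons p rest ih =>
      obtain ⟨h, options⟩ := p
      rw [List.foldl_cons, ih, get?_inner_fold]
      cases hdu : d.get? u with
      | some v => simp
      | none =>
          simp only [rowOpt, altAns_ofList]
          by_cases hm : u ∈ options
          · simp [hm]
          · simp [hm]

lemma getD_altIndex (hd : List (String × List String)) (lm : List (String × String)) (u : String) :
    (altIndex hd lm).getD u ("en", none) = psRow u lm hd := by
  rw [PySem.Dict.getD_eq_get?_getD]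
  unfold altIndex
  rw [get?_build_fold]
  have : (PySem.Dict.empty : PySem.Dict String (String × Option String)).get? u = none :=
    PySem.Dict.get?_empty u
  rw [this]
  induction hd with
  | nil => rfl
  | cons p rest ih =>
      obtain ⟨h, options⟩ := p
      simp only [rowOpt, psRow]
      by_cases hm : u ∈ options
      · simp [hm]
      · simp only [List.contains_iff_mem]
        simp [hm, ih]

-- ===== VERDICT (by name: the statement is the Claim_ definition above) =====
theorem process_sources_spec : Claim_equal_process_sources := by
  intro urls hostDict language_mapping _
  unfold Spec_process_sources process_sources process_sources_alt
  rw [PySem.List.foldl_append_singleton_eq_map]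
  exact List.map_congr_left (fun u _ => (getD_altIndex hostDict language_mapping u).symm)
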